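-- pv_equiv track=rewrite | github.com/Mimix231/sm64dx | ai_tools/fix_includes.py | skip_c_prologue
-- ===== SOURCE A (Python) =====
-- def skip_c_prologue(lines: list[str]) -> int:
--     i = 0
--     if lines and lines[0].startswith("#!"):
--         i += 1
--     while i < len(lines):
--         stripped = lines[i].strip()
--         if stripped == "":
--             i += 1
--             continue
--         if stripped == "#pragma once":
--             i += 1
--             continue
--         if stripped.startswith("//"):
--             i += 1
--             continue
--         if stripped.startswith("/*"):
--             i += 1
--             while i < len(lines) and "*/" not in lines[i - 1]:
--                 i += 1
--             continue
--         break
--     return i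
-- ===== SOURCE B (Python) =====
-- def skip_c_prologue(lines: list[str]) -> int:
--     start = 1 if lines and lines[0].startswith("#!") else 0
--     body = lines[start:]
--     # stage 1: flags[k] is True iff body[k] lies inside a block comment opened on an earlier line
--     flags = []
--     state = False
--     for line in body:
--         flags.append(state)
--         if state:
--             state = "*/" not in line
--         else:
--             state = line.strip().startswith("/*") and "*/" not in line
--     # stage 2: first line that is neither inside a block comment nor a prologue line
--     for k in range(len(body)):
--         if not flags[k]:
--             s = body[k].strip()
--             if s != "" and s != "#pragma once" and not s.startswith("//") and not s.startswith("/*"):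
--                 return start + k
--     return len(lines)
-- ===== Notes on version B (the rewrite author's own statement) =====
-- stated objective: alternative
-- what changed: Replaces A's single interleaved scan with a nested inner while by two staged passes: pass 1 precomputes a per-line list of in-block-comment flags, pass 2 searches that annotated list for the first non-prologue line.
import Mathlib
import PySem

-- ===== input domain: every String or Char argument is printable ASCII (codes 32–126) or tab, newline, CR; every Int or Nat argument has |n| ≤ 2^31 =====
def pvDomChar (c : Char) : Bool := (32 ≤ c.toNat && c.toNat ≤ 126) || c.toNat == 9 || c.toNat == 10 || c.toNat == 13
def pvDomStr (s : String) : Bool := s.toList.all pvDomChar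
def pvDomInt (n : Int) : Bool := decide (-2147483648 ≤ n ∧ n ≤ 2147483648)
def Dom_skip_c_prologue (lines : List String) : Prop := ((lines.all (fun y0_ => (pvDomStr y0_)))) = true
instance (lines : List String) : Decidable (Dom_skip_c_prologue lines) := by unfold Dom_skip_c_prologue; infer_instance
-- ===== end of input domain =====

-- B restructures A's interleaved scan (nested inner while) into two staged passes:
-- pass 1 precomputes per-line in-block-comment flags, pass 2 searches the annotated list (objective: alternative).

-- ===== PORT A =====
-- inner while: 'while i < len(lines) and "*/" not in lines[i-1]: i += 1'
def skipABlock (lines : List String) (i : Nat) : Nat :=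
  if i < lines.length ∧ ¬ (PySem.Str.isIn "*/" (lines.getD (i - 1) "") = true) then
    skipABlock lines (i + 1)
  else i
termination_by lines.length - i

theorem skipABlock_ge (lines : List String) (i : Nat) : i ≤ skipABlock lines i := by
  unfold skipABlock
  split
  · exact le_trans (Nat.le_succ i) (skipABlock_ge lines (i + 1))
  · exact le_refl i
termination_by lines.length - i

-- outer while of A
def skipAOuter (lines : List String) (i : Nat) : Nat :=
  if _h : i < lines.length then
    let stripped := PySem.Str.strip (lines.getD i "")
    if stripped = "" then skipAOuter lines (i + 1)
    else if stripped = "#pragma once" then skipAOuter lines (i + 1)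
    else if PySem.Str.startswith stripped "//" then skipAOuter lines (i + 1)
    else if PySem.Str.startswith stripped "/*" then
      skipAOuter lines (skipABlock lines (i + 1))
    else i
  else i
termination_by lines.length - i
decreasing_by
  · omega
  · omega
  · omega
  · have := skipABlock_ge lines (i + 1); omega

def skip_c_prologue (lines : List String) : Int :=
  let i0 : Nat := if (!lines.isEmpty) && PySem.Str.startswith (lines.getD 0 "") "#!" then 1 else 0
  (skipAOuter lines i0 : Int)

-- ===== PORT B =====
-- stage 2 of Source B: 'for k in range(len(body)): …' with early return, default len(lines)
def skipBStage2 (body : List String) (flags : List Bool) (start : Nat) (total : Nat) (k : Nat) : Int :=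
  if k < body.length then
    if flags.getD k false then skipBStage2 body flags start total (k + 1)
    else
      let s := PySem.Str.strip (body.getD k "")
      if s ≠ "" ∧ s ≠ "#pragma once" ∧ ¬ (PySem.Str.startswith s "//" = true) ∧
          ¬ (PySem.Str.startswith s "/*" = true) then
        ((start + k : Nat) : Int)
      else skipBStage2 body flags start total (k + 1)
  else (total : Int)
termination_by body.length - k

def skip_c_prologue_alt (lines : List String) : Int :=
  let start : Nat := if (!lines.isEmpty) && PySem.Str.startswith (lines.getD 0 "") "#!" then 1 else 0
  let body : List String := PySem.List.slice lines (some (start : Int)) none   -- lines[start:]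
  -- stage 1 of Source B: fold appending the current state to flags, then updating the state
  let flags : List Bool :=
    (body.foldl (fun acc line =>
        (acc.1 ++ [acc.2],
         if acc.2 then !PySem.Str.isIn "*/" line
         else PySem.Str.startswith (PySem.Str.strip line) "/*" && !PySem.Str.isIn "*/" line))
      (([] : List Bool), false)).1
  skipBStage2 body flags start lines.length 0

-- ===== PRECONDITION & SPEC =====
def Spec_skip_c_prologue (lines : List String) (out : Int) : Prop := out = skip_c_prologue_alt lines
instance (lines : List String) (out : Int) : Decidable (Spec_skip_c_prologue lines out) := by unfold Spec_skip_c_prologue; infer_instance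

-- ===== CLAIM =====
def Claim_equal_skip_c_prologue : Prop := ∀ (lines : List String), Dom_skip_c_prologue lines → Spec_skip_c_prologue lines (skip_c_prologue lines)

-- ===== LEMMAS AND PROOFS =====

-- step function of Source B's stage-1 state (proof-side abbreviation of the fold's second component)
def pvStep (st : Bool) (line : String) : Bool :=
  if st then !PySem.Str.isIn "*/" line
  else PySem.Str.startswith (PySem.Str.strip line) "/*" && !PySem.Str.isIn "*/" line

-- the list of states emitted by stage 1 starting from st
def pvStates (st : Bool) : List String → List Bool
  | [] => []
  | l :: ls => st :: pvStates (pvStep st l) ls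

theorem pvFold_spec (body : List String) (acc : List Bool) (st : Bool) :
    (body.foldl (fun acc line =>
        (acc.1 ++ [acc.2],
         if acc.2 then !PySem.Str.isIn "*/" line
         else PySem.Str.startswith (PySem.Str.strip line) "/*" && !PySem.Str.isIn "*/" line))
      (acc, st)).1 = acc ++ pvStates st body := by
  induction body generalizing acc st with
  | nil => simp [pvStates]
  | cons l ls ih =>
    simp only [List.foldl_cons, pvStates]
    rw [ih]
    show (acc ++ [st]) ++ pvStates (pvStep st l) ls = acc ++ st :: pvStates (pvStep st l) ls
    simp

theorem pvStates_getD (body : List String) (st : Bool) (k : Nat) (hk : k < body.length) :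
    (pvStates st body).getD k false = (body.take k).foldl pvStep st := by
  induction body generalizing st k with
  | nil => simp at hk
  | cons l ls ih =>
    cases k with
    | zero => simp [pvStates]
    | succ k =>
      simp only [pvStates, List.getD_cons_succ, List.take_succ_cons, List.foldl_cons]
      exact ih (pvStep st l) k (by simpa using hk)

theorem pvFoldStep (body : List String) (st : Bool) (k : Nat) (hk : k < body.length) :
    (body.take (k + 1)).foldl pvStep st = pvStep ((body.take k).foldl pvStep st) (body.getD k "") := by
  rw [List.take_add_one]
  have : body[k]? = some (body.getD k "") := by
    rw [List.getD_eq_getElem _ _ hk]; exact List.getElem?_eq_getElem hk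
  rw [this]
  simp

theorem getD_drop (lines : List String) (start k : Nat) :
    (lines.drop start).getD k "" = lines.getD (start + k) "" := by
  by_cases h : start + k < lines.length
  · rw [List.getD_eq_getElem _ _ (by simp; omega), List.getD_eq_getElem _ _ h]
    simp [List.getElem_drop]
  · have h1 : (lines.drop start).length ≤ k := by simp; omega
    have h2 : lines.length ≤ start + k := by omega
    rw [List.getD_eq_default _ _ h1, List.getD_eq_default _ _ h2]

-- a line whose strip starts with "//" does not start with "/*"
theorem startswith_slashslash_not_slashstar (s : String)
    (h : PySem.Str.startswith s "//" = true) : PySem.Str.startswith s "/*" = false := by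
  by_contra hc
  have hc' : PySem.Str.startswith s "/*" = true := by
    revert hc; cases PySem.Str.startswith s "/*" <;> simp
  have h1 : "//".toList <+: s.toList := (PySem.Chars.startswith_iff _ _).mp (by simpa using h)
  have h2 : "/*".toList <+: s.toList := (PySem.Chars.startswith_iff _ _).mp (by simpa using hc')
  obtain ⟨t1, ht1⟩ := h1
  obtain ⟨t2, ht2⟩ := h2
  have e1 : "//".toList = ['/', '/'] := by decide
  have e2 : "/*".toList = ['/', '*'] := by decide
  rw [e1] at ht1; rw [e2] at ht2
  simp only [List.cons_append, List.nil_append] at ht1 ht2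
  have heq := ht1.trans ht2.symm
  simp at heq

-- flag-carrying single loop: an intermediate form sitting between A's nested loops and B's staged passes
def skipFlag (lines : List String) (i : Nat) (inBlock : Bool) : Nat :=
  if i < lines.length then
    if inBlock then
      skipFlag lines (i + 1) (!PySem.Str.isIn "*/" (lines.getD i ""))
    else
      let stripped := PySem.Str.strip (lines.getD i "")
      if stripped = "" ∨ stripped = "#pragma once" ∨ PySem.Str.startswith stripped "//" = true then
        skipFlag lines (i + 1) false
      else if PySem.Str.startswith stripped "/*" then
        skipFlag lines (i + 1) (!PySem.Str.isIn "*/" (lines.getD i ""))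
      else i
  else i
termination_by lines.length - i

-- A's two nested loops equal the flag-carrying loop (fuel induction)
theorem skip_loops_eq (lines : List String) (n : Nat) :
    ∀ j : Nat, lines.length ≤ j + n →
      (skipAOuter lines j = skipFlag lines j false ∧
       (1 ≤ j → skipAOuter lines (skipABlock lines j)
          = skipFlag lines j (!PySem.Str.isIn "*/" (lines.getD (j - 1) "")))) := by
  induction n with
  | zero =>
    intro j hj
    have hnot : ¬ j < lines.length := by omega
    constructor
    · rw [skipAOuter, skipFlag, dif_neg hnot, if_neg hnot]
    · intro _
      rw [skipABlock, if_neg (fun h => hnot h.1), skipAOuter, skipFlag, dif_neg hnot, if_neg hnot]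
  | succ n ih =>
    intro j hj
    by_cases hlt : j < lines.length
    · have ih1 := (ih (j + 1) (by omega)).1
      have ih2 := (ih (j + 1) (by omega)).2 (by omega)
      have main : skipAOuter lines j = skipFlag lines j false := by
        rw [skipAOuter, skipFlag, dif_pos hlt, if_pos hlt]
        rw [if_neg (by simp : ¬ (false = true))]
        dsimp only []
        generalize PySem.Str.strip (lines.getD j "") = s
        split_ifs with h1 h2 h3 h4 h5 h6 h7 h8 h9 h10 <;>
          first
            | exact ih1
            | exact ih2
            | omega
            | tauto
      refine ⟨main, ?_⟩
      intro _
      rw [skipABlock]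
      by_cases hb : PySem.Str.isIn "*/" (lines.getD (j - 1) "") = true
      · rw [if_neg (fun h => h.2 hb)]
        have hflag : (!PySem.Str.isIn "*/" (lines.getD (j - 1) "")) = false := by
          rw [hb]; rfl
        rw [hflag]
        exact main
      · rw [if_pos ⟨hlt, hb⟩]
        have hX : PySem.Str.isIn "*/" (lines.getD (j - 1) "") = false := by
          revert hb; cases PySem.Str.isIn "*/" (lines.getD (j - 1) "") <;> simp
        rw [skipFlag, if_pos hlt,
          if_pos (show (!PySem.Str.isIn "*/" (lines.getD (j - 1) "")) = true by rw [hX]; rfl)]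
        exact ih2
    · have hnot : ¬ j < lines.length := hlt
      constructor
      · rw [skipAOuter, skipFlag, dif_neg hnot, if_neg hnot]
      · intro _
        rw [skipABlock, if_neg (fun h => hnot h.1), skipAOuter, skipFlag, dif_neg hnot, if_neg hnot]

-- the flag loop over lines starting at start+k equals B's stage 2 over body = lines.drop start,
-- provided the flag equals the stage-1 state accumulated over body.take k
set_option maxHeartbeats 2000000 in
theorem flag_eq_stage2 (lines : List String) (start : Nat) (hstart : start ≤ lines.length) (n : Nat) :
    ∀ k : Nat, (lines.drop start).length ≤ k + n → k ≤ (lines.drop start).length →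
      ((skipFlag lines (start + k) (((lines.drop start).take k).foldl pvStep false) : Nat) : Int)
        = skipBStage2 (lines.drop start) (pvStates false (lines.drop start)) start lines.length k := by
  induction n with
  | zero =>
    intro k hk hk2
    have hlen : (lines.drop start).length = lines.length - start := by simp
    have hnot : ¬ start + k < lines.length := by omega
    have hnot2 : ¬ k < (lines.drop start).length := by omega
    rw [skipFlag, if_neg hnot, skipBStage2, if_neg hnot2]
    congr 1
    omega
  | succ n ih =>
    intro k hk hk2
    set body := lines.drop start with hbody
    by_cases hklt : k < body.length
    · have hlen : body.length = lines.length - start := by simp [hbody]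
      have hilt : start + k < lines.length := by omega
      have hline : lines.getD (start + k) "" = body.getD k "" := (getD_drop lines start k).symm
      have hflag : (pvStates false body).getD k false = (body.take k).foldl pvStep false :=
        pvStates_getD body false k hklt
      have hstep : (body.take (k + 1)).foldl pvStep false
          = pvStep ((body.take k).foldl pvStep false) (body.getD k "") :=
        pvFoldStep body false k hklt
      have ihk := ih (k + 1) (by omega) (by omega)
      rw [show start + (k + 1) = start + k + 1 by omega] at ihk
      have fin : ∀ X : Bool, (body.take (k + 1)).foldl pvStep false = X →
          ((skipFlag lines (start + k + 1) X : Nat) : Int)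
            = skipBStage2 body (pvStates false body) start lines.length (k + 1) := by
        intro X hX; rw [← hX]; exact ihk
      rw [skipFlag, if_pos hilt, skipBStage2, if_pos hklt, hflag, hline]
      by_cases hst : (body.take k).foldl pvStep false = true
      · rw [hst, if_pos rfl, if_pos rfl]
        exact fin _ (by rw [hstep, hst]; simp [pvStep])
      · have hst' : (body.take k).foldl pvStep false = false := by
          revert hst; cases (body.take k).foldl pvStep false <;> simp
        have hfneg : ¬ ((false : Bool) = true) := by simp
        rw [hst', if_neg hfneg, if_neg hfneg]
        by_cases h1 : PySem.Str.strip (body.getD k "") = ""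
        · have hC : ¬ (PySem.Str.strip (body.getD k "") ≠ "" ∧
              PySem.Str.strip (body.getD k "") ≠ "#pragma once" ∧
              ¬ (PySem.Str.startswith (PySem.Str.strip (body.getD k "")) "//" = true) ∧
              ¬ (PySem.Str.startswith (PySem.Str.strip (body.getD k "")) "/*" = true)) := fun h => h.1 h1
          rw [if_pos (Or.inl h1), if_neg hC]
          have e1 : PySem.Str.startswith "" "/*" = false := by decide
          exact fin false (by rw [hstep, hst']; simp only [pvStep]; rw [if_neg hfneg, h1, e1]; simp)
        · by_cases h2 : PySem.Str.strip (body.getD k "") = "#pragma once"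
          · have hC : ¬ (PySem.Str.strip (body.getD k "") ≠ "" ∧
                PySem.Str.strip (body.getD k "") ≠ "#pragma once" ∧
                ¬ (PySem.Str.startswith (PySem.Str.strip (body.getD k "")) "//" = true) ∧
                ¬ (PySem.Str.startswith (PySem.Str.strip (body.getD k "")) "/*" = true)) := fun h => h.2.1 h2
            rw [if_pos (Or.inr (Or.inl h2)), if_neg hC]
            have e2 : PySem.Str.startswith "#pragma once" "/*" = false := by decide
            exact fin false (by rw [hstep, hst']; simp only [pvStep]; rw [if_neg hfneg, h2, e2]; simp)
          · by_cases h3 : PySem.Str.startswith (PySem.Str.strip (body.getD k "")) "//" = true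
            · have hC : ¬ (PySem.Str.strip (body.getD k "") ≠ "" ∧
                  PySem.Str.strip (body.getD k "") ≠ "#pragma once" ∧
                  ¬ (PySem.Str.startswith (PySem.Str.strip (body.getD k "")) "//" = true) ∧
                  ¬ (PySem.Str.startswith (PySem.Str.strip (body.getD k "")) "/*" = true)) := fun h => h.2.2.1 h3
              rw [if_pos (Or.inr (Or.inr h3)), if_neg hC]
              have e3 := startswith_slashslash_not_slashstar _ h3
              exact fin false (by rw [hstep, hst']; simp only [pvStep]; rw [if_neg hfneg, e3]; simp)
            · have hD : ¬ (PySem.Str.strip (body.getD k "") = "" ∨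
                  PySem.Str.strip (body.getD k "") = "#pragma once" ∨
                  PySem.Str.startswith (PySem.Str.strip (body.getD k "")) "//" = true) := fun h => h.elim h1 (fun h' => h'.elim h2 h3)
              rw [if_neg hD]
              by_cases h4 : PySem.Str.startswith (PySem.Str.strip (body.getD k "")) "/*" = true
              · have hC : ¬ (PySem.Str.strip (body.getD k "") ≠ "" ∧
                    PySem.Str.strip (body.getD k "") ≠ "#pragma once" ∧
                    ¬ (PySem.Str.startswith (PySem.Str.strip (body.getD k "")) "//" = true) ∧
                    ¬ (PySem.Str.startswith (PySem.Str.strip (body.getD k "")) "/*" = true)) := fun h => h.2.2.2 h4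
                rw [if_pos h4, if_neg hC]
                exact fin _ (by rw [hstep, hst']; simp only [pvStep]; rw [if_neg hfneg, h4]; simp)
              · have hC : (PySem.Str.strip (body.getD k "") ≠ "" ∧
                    PySem.Str.strip (body.getD k "") ≠ "#pragma once" ∧
                    ¬ (PySem.Str.startswith (PySem.Str.strip (body.getD k "")) "//" = true) ∧
                    ¬ (PySem.Str.startswith (PySem.Str.strip (body.getD k "")) "/*" = true)) :=
                  ⟨h1, h2, h3, h4⟩
                rw [if_neg h4, if_pos hC]
    · have hke : k = body.length := by omega
      have hlen : body.length = lines.length - start := by simp [hbody]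
      have hnot : ¬ start + k < lines.length := by omega
      rw [skipFlag, if_neg hnot, skipBStage2, if_neg hklt]
      congr 1
      omega

-- ===== VERDICT =====
theorem skip_c_prologue_spec : Claim_equal_skip_c_prologue := by
  intro lines _
  unfold Spec_skip_c_prologue skip_c_prologue skip_c_prologue_alt
  have key : ∀ s0 : Nat, s0 ≤ lines.length →
      ((skipAOuter lines s0 : Nat) : Int)
        = skipBStage2 (lines.drop s0) (pvStates false (lines.drop s0)) s0 lines.length 0 := by
    intro s0 hstart
    have hA := (skip_loops_eq lines lines.length s0 (by omega)).1
    have hB := flag_eq_stage2 lines s0 hstart (lines.drop s0).length 0 (by omega) (by omega)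
    simp only [List.take_zero, List.foldl_nil, Nat.add_zero] at hB
    rw [hA]
    exact hB
  dsimp only []
  rw [PySem.List.slice_from_natCast, pvFold_spec, List.nil_append]
  apply key
  split
  · rename_i h
    have hne : lines ≠ [] := by
      intro he; simp [he] at h
    have := List.length_pos_iff.mpr hne
    omega
  · omega
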